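-- pv_equiv track=rewrite | github.com/TraMiu/Nonogram-COMP2050 | solvers/min_rem_val.py | calculate_domains
-- ===== SOURCE A (Python) =====
-- from itertools import combinations
--
-- def calculate_domains(y_nums, x_nums):
--     width = len(x_nums)
--     height = len(y_nums)
--     valid_cols = [[] for i in range(width)]
--     valid_rows = [[] for i in range(height)]
--
--     for i in range(width):
--         n_groups = len(x_nums[i])
--         n_empty = min(height, height - (n_groups - 1) - sum(x_nums[i]))
--         comb = list(combinations(range(n_groups + n_empty), n_groups))
--         for group_loc in comb:
--             column = []
--             group_id = 0
--             for j in range(n_groups + n_empty):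
--                 if j in group_loc:
--                     column += [1] * x_nums[i][group_id]
--                     group_id += 1
--                     if group_id != n_groups:
--                         column += [2]
--                 else:
--                     column += [2]
--             valid_cols[i].append(column)
--
--     for i in range(height):
--         n_groups = len(y_nums[i])
--         n_empty = min(width, width - (n_groups - 1) - sum(y_nums[i]))
--         comb = list(combinations(range(n_groups + n_empty), n_groups))
--         for group_loc in comb:
--             row = []
--             group_id = 0
--             for j in range(n_groups + n_empty):
--                 if j in group_loc:
--                     row += [1] * y_nums[i][group_id]
--                     group_id += 1
--                     if group_id != n_groups:
--                         row += [2]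
--                 else:
--                     row += [2]
--             valid_rows[i].append(row)
--
--     return valid_cols, valid_rows
-- ===== SOURCE B (Python) =====
-- def calculate_domains(y_nums, x_nums):
--     # Recursive gap-driven generator instead of enumerating index combinations.
--     def gen(sizes, slots):
--         if not sizes:
--             return [[2] * slots]
--         head, rest = sizes[0], sizes[1:]
--         sep = [2] if rest else []
--         out = []
--         for gap in range(slots - len(sizes) + 1):
--             block = [2] * gap + [1] * head + sep
--             for tail in gen(rest, slots - gap - 1):
--                 out.append(block + tail)
--         return out
--
--     def lines(sizes, length):
--         # total slot count: one slot per group plus the placeable empty cells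
--         slots = len(sizes) + min(length, length - (len(sizes) - 1) - sum(sizes))
--         return gen(sizes, slots)
--
--     height = len(y_nums)
--     width = len(x_nums)
--     valid_cols = [lines(sizes, height) for sizes in x_nums]
--     valid_rows = [lines(sizes, width) for sizes in y_nums]
--     return valid_cols, valid_rows
-- ===== Notes on version B (the rewrite author's own statement) =====
-- stated objective: alternative
-- what changed: A enumerates index combinations and rebuilds every line with an inner per-cell membership scan; B generates the fillings directly by a recursive leading-gap decomposition (gap + first block + recurse on the remaining groups), with no combinations list and no membership tests.
import Mathlib
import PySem

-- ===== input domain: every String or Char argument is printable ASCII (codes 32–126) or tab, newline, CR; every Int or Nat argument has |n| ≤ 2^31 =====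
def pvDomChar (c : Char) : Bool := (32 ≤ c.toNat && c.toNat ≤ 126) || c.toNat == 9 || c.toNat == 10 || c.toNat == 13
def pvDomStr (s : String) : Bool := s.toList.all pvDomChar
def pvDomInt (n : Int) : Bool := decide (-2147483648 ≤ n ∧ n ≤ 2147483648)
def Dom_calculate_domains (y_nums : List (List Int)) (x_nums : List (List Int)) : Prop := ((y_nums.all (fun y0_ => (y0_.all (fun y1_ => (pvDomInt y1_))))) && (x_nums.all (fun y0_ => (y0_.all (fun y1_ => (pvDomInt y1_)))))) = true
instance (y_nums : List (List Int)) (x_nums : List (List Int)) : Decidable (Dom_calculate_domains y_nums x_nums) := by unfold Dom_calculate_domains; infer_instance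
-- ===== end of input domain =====

-- B replaces A's enumeration of index combinations (with an inner membership scan per cell)
-- by a recursive leading-gap generator of the line fillings; equal output, different decomposition.

-- ===== PORT A =====
-- itertools.combinations(range-list, k) in Python's lexicographic order
def pvCombos : Nat → List Nat → List (List Nat)
  | 0, _ => [[]]
  | _ + 1, [] => []
  | k + 1, x :: xs => (pvCombos k xs).map (fun c => x :: c) ++ pvCombos (k + 1) xs

-- body of A's inner `for j in range(...)` loop; state = (column, group_id).
-- x_nums[i][group_id] never raises (group_id < n_groups whenever it is read), so getD is exact;
-- `[1] * v` for Int v is replicate v.toNat (empty for v ≤ 0), Python-exact.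
def pvAStep (sizes : List Int) (loc : List Nat) : List Int × Nat → Nat → List Int × Nat
  | (col, gid), j =>
    if j ∈ loc then
      let col2 := col ++ List.replicate (sizes.getD gid 0).toNat 1
      if gid + 1 ≠ sizes.length then (col2 ++ [2], gid + 1) else (col2, gid + 1)
    else (col ++ [2], gid)

-- A's per-line block (identical for the column and the row loop in the Python)
def pvALine (sizes : List Int) (len : Int) : List (List Int) :=
  let k := sizes.length
  let e := min len (len - ((k : Int) - 1) - sizes.sum)
  let m := ((k : Int) + e).toNat          -- range(negative) is empty, so toNat is exact
  (pvCombos k (List.range m)).map (fun loc => ((List.range m).foldl (pvAStep sizes loc) ([], 0)).1)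

def calculate_domains (y_nums : List (List Int)) (x_nums : List (List Int)) : List (List (List Int)) × List (List (List Int)) :=
  (x_nums.map (fun sizes => pvALine sizes (y_nums.length : Int)),
   y_nums.map (fun sizes => pvALine sizes (x_nums.length : Int)))

-- ===== PORT B =====
-- Source B's gen(sizes, slots): leading gap, first block, recurse on the rest
def pvGen : List Int → Int → List (List Int)
  | [], slots => [List.replicate slots.toNat 2]
  | h :: t, slots =>
    (List.range (slots - ((t.length : Int) + 1) + 1).toNat).flatMap (fun (gap : Nat) =>
      (pvGen t (slots - (gap : Int) - 1)).map (fun tail =>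
        (List.replicate gap 2 ++ List.replicate h.toNat 1 ++ (if t.isEmpty then [] else [2])) ++ tail))

def pvBLines (sizes : List Int) (len : Int) : List (List Int) :=
  pvGen sizes ((sizes.length : Int) + min len (len - ((sizes.length : Int) - 1) - sizes.sum))

def calculate_domains_alt (y_nums : List (List Int)) (x_nums : List (List Int)) : List (List (List Int)) × List (List (List Int)) :=
  (x_nums.map (fun sizes => pvBLines sizes (y_nums.length : Int)),
   y_nums.map (fun sizes => pvBLines sizes (x_nums.length : Int)))

-- ===== PRECONDITION & SPEC =====
def Spec_calculate_domains (y_nums : List (List Int)) (x_nums : List (List Int)) (out : List (List (List Int)) × List (List (List Int))) : Prop := out = calculate_domains_alt y_nums x_nums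
instance (y_nums : List (List Int)) (x_nums : List (List Int)) (out : List (List (List Int)) × List (List (List Int))) : Decidable (Spec_calculate_domains y_nums x_nums out) := by unfold Spec_calculate_domains; infer_instance

-- ===== CLAIM (what is proved, stated in full; the proofs are below) =====
def Claim_equal_calculate_domains : Prop := ∀ (y_nums : List (List Int)) (x_nums : List (List Int)), Dom_calculate_domains y_nums x_nums → Spec_calculate_domains y_nums x_nums (calculate_domains y_nums x_nums)

-- ===== LEMMAS AND PROOFS =====

-- A's step reads j only through the membership test
lemma pvAStep_acc (sizes : List Int) (loc : List Nat) (a : List Int) (g : Nat) (j : Nat) :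
    pvAStep sizes loc (a, g) j = (a ++ (pvAStep sizes loc ([], g) j).1, (pvAStep sizes loc ([], g) j).2) := by
  simp only [pvAStep]
  split_ifs <;> simp

lemma foldl_pvAStep_acc (sizes : List Int) (loc : List Nat) :
    ∀ (js : List Nat) (a : List Int) (g : Nat),
      js.foldl (pvAStep sizes loc) (a, g) =
        (a ++ (js.foldl (pvAStep sizes loc) ([], g)).1, (js.foldl (pvAStep sizes loc) ([], g)).2) := by
  intro js
  induction js with
  | nil => simp
  | cons j js ih =>
    intro a g
    simp only [List.foldl_cons]
    rw [pvAStep_acc sizes loc a g j]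
    rcases hP : pvAStep sizes loc ([], g) j with ⟨c, g'⟩
    rw [ih (a ++ c) g', ih c g', List.append_assoc]

lemma foldl_pvAStep_nil_loc (sizes : List Int) :
    ∀ (js : List Nat) (g : Nat),
      js.foldl (pvAStep sizes []) ([], g) = (List.replicate js.length 2, g) := by
  intro js
  induction js with
  | nil => simp
  | cons j js ih =>
    intro g
    simp only [List.foldl_cons]
    have h0 : pvAStep sizes [] ([], g) j = ([2], g) := by simp [pvAStep]
    rw [h0, foldl_pvAStep_acc, ih g]
    simp [List.replicate_succ]

lemma foldl_pvAStep_shift (sizes : List Int) (loc' loc : List Nat)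
    (h : ∀ j, (j + 1) ∈ loc' ↔ j ∈ loc) :
    ∀ (js : List Nat) (st : List Int × Nat),
      (js.map Nat.succ).foldl (pvAStep sizes loc') st = js.foldl (pvAStep sizes loc) st := by
  intro js
  induction js with
  | nil => simp
  | cons j js ih =>
    intro st
    rcases st with ⟨a, g⟩
    simp only [List.map_cons, List.foldl_cons]
    have hstep : pvAStep sizes loc' (a, g) j.succ = pvAStep sizes loc (a, g) j := by
      simp only [pvAStep, Nat.succ_eq_add_one, h j]
    rw [hstep, ih]

lemma foldl_pvAStep_tail (h : Int) (t : List Int) (loc : List Nat) :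
    ∀ (js : List Nat) (a : List Int) (g : Nat),
      js.foldl (pvAStep (h :: t) loc) (a, g + 1) =
        ((js.foldl (pvAStep t loc) (a, g)).1, (js.foldl (pvAStep t loc) (a, g)).2 + 1) := by
  intro js
  induction js with
  | nil => simp
  | cons j js ih =>
    intro a g
    simp only [List.foldl_cons]
    by_cases hj : j ∈ loc
    · have hlen : (g + 1 + 1 ≠ (h :: t).length) = (g + 1 ≠ t.length) := by
        simp [List.length_cons]
      simp only [pvAStep, hj, if_pos, List.getD_cons_succ, List.length_cons]
      by_cases hg : g + 1 = t.length
      · rw [if_neg (by omega), if_neg (by simp [hg])]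
        exact ih _ _
      · rw [if_pos (by omega), if_pos (by omega)]
        exact ih _ _
    · simp only [pvAStep, hj, ite_false]
      exact ih _ _

lemma pvCombos_map (f : Nat → Nat) :
    ∀ (l : List Nat) (k : Nat), pvCombos k (l.map f) = (pvCombos k l).map (List.map f) := by
  intro l
  induction l with
  | nil => intro k; cases k <;> simp [pvCombos]
  | cons x xs ih =>
    intro k
    cases k with
    | zero => simp [pvCombos]
    | succ k => simp [pvCombos, ih, List.map_map, Function.comp_def]

-- peel the gap loop of pvGen
lemma pvGen_peel (h : Int) (t : List Int) (m : Nat) :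
    pvGen (h :: t) ((m : Int) + 1) =
      (pvGen t (m : Int)).map (fun tail => (List.replicate h.toNat 1 ++ (if t.isEmpty then [] else [2])) ++ tail) ++
      (pvGen (h :: t) ((m : Int))).map (fun c => 2 :: c) := by
  by_cases hk : t.length ≤ m
  · have hn : ((m : Int) + 1 - ((t.length : Int) + 1) + 1).toNat = (m - t.length) + 1 := by omega
    have hn' : ((m : Int) - ((t.length : Int) + 1) + 1).toNat = m - t.length := by omega
    rw [pvGen, hn, List.range_succ_eq_map, List.flatMap_cons, List.flatMap_map]
    congr 1
    · have : (m : Int) + 1 - (0 : Nat) - 1 = (m : Int) := by push_cast; ring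
      rw [this]
      simp
    · rw [show pvGen (h :: t) ((m : Int)) =
        (List.range (m - t.length)).flatMap (fun (gap : Nat) =>
          (pvGen t ((m : Int) - (gap : Int) - 1)).map (fun tail =>
            (List.replicate gap 2 ++ List.replicate h.toNat 1 ++ (if t.isEmpty then [] else [2])) ++ tail))
        from by rw [pvGen, hn']]
      rw [List.map_flatMap]
      apply List.flatMap_congr
      intro gap _
      have harg : (m : Int) + 1 - ((gap.succ : Nat) : Int) - 1 = (m : Int) - (gap : Int) - 1 := by
        push_cast; ring
      rw [harg, List.replicate_succ, List.map_map]
      apply List.map_congr_left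
      intro tail _
      simp
  · -- t.length > m : every piece is empty
    have h1 : ((m : Int) + 1 - ((t.length : Int) + 1) + 1).toNat = 0 := by omega
    rcases t with _ | ⟨h', t'⟩
    · simp at hk
    · rw [pvGen, h1]
      rw [show pvGen (h' :: t') ((m:Int)) = (List.range ((m:Int) - ((t'.length : Int) + 1) + 1).toNat).flatMap _ from by rw [pvGen]]
      rw [show pvGen (h :: h' :: t') ((m:Int)) = (List.range ((m:Int) - (((h' :: t').length : Int) + 1) + 1).toNat).flatMap _ from by rw [pvGen]]
      have e1 : ((m:Int) - ((t'.length : Int) + 1) + 1).toNat = 0 := by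
        simp only [List.length_cons] at hk; omega
      have e2 : ((m:Int) - (((h' :: t').length : Int) + 1) + 1).toNat = 0 := by
        simp only [List.length_cons] at hk ⊢; omega
      rw [e1, e2]
      simp

-- main correspondence: combinations enumeration = gap recursion
lemma pvMain : ∀ (m : Nat) (sizes : List Int),
    (pvCombos sizes.length (List.range m)).map
        (fun loc => ((List.range m).foldl (pvAStep sizes loc) ([], 0)).1) =
      pvGen sizes (m : Int) := by
  intro m
  induction m with
  | zero =>
    intro sizes
    cases sizes with
    | nil => simp [pvCombos, pvGen]
    | cons h t =>
      have e : ((0 : Int) - ((t.length : Int) + 1) + 1).toNat = 0 := by omega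
      simp [pvCombos, pvGen]
  | succ m ih =>
    intro sizes
    cases sizes with
    | nil =>
      have e : (((m : Nat) + 1 : Nat) : Int).toNat = m + 1 := by omega
      simp [pvCombos, pvGen, foldl_pvAStep_nil_loc]
    | cons h t =>
      -- split range(m+1) = 0 :: succ-shifted range m and the combinations over it
      rw [List.range_succ_eq_map]
      show ((pvCombos t.length ((List.range m).map Nat.succ)).map (fun c => (0 : Nat) :: c)
            ++ pvCombos (t.length + 1) ((List.range m).map Nat.succ)).map _ = _
      rw [pvCombos_map Nat.succ, pvCombos_map Nat.succ, List.map_append, List.map_map, List.map_map,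
        show ((( m + 1 : Nat) : Int)) = (m : Int) + 1 by push_cast; ring, pvGen_peel]
      congr 1
      · -- gap-0 part: combination starts with 0
        rw [← ih t]
        simp only [List.map_map]
        apply List.map_congr_left
        intro c _
        show ((0 :: (List.range m).map Nat.succ).foldl
            (pvAStep (h :: t) (0 :: c.map Nat.succ)) ([], 0)).1 = _
        have hstep0 : pvAStep (h :: t) (0 :: c.map Nat.succ) ([], 0) 0 =
            (List.replicate h.toNat 1 ++ (if t.isEmpty then [] else [2]), 1) := by
          cases t <;> simp [pvAStep]
        have hmem : ∀ j : Nat, (j + 1) ∈ (0 : Nat) :: c.map Nat.succ ↔ j ∈ c := by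
          intro j; simp [Nat.succ_eq_add_one]
        rw [List.foldl_cons, hstep0,
          foldl_pvAStep_shift (h :: t) (0 :: c.map Nat.succ) c hmem,
          show (1 : Nat) = 0 + 1 from rfl, foldl_pvAStep_tail, foldl_pvAStep_acc]
        rfl
      · -- positive-gap part: 0 not in the combination
        rw [← ih (h :: t)]
        simp only [List.map_map]
        apply List.map_congr_left
        intro c _
        show ((0 :: (List.range m).map Nat.succ).foldl
            (pvAStep (h :: t) (c.map Nat.succ)) ([], 0)).1 = _
        have hstep0 : pvAStep (h :: t) (c.map Nat.succ) ([], 0) 0 = ([2], 0) := by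
          simp [pvAStep]
        have hmem : ∀ j : Nat, (j + 1) ∈ c.map Nat.succ ↔ j ∈ c := by
          intro j; simp [Nat.succ_eq_add_one]
        rw [List.foldl_cons, hstep0,
          foldl_pvAStep_shift (h :: t) (c.map Nat.succ) c hmem, foldl_pvAStep_acc]
        rfl

lemma pvLine_eq (sizes : List Int) (L : Int) :
    pvALine sizes L = pvBLines sizes L := by
  cases sizes with
  | nil =>
    simp only [pvALine, pvBLines, List.length_nil, List.sum_nil]
    rw [show min L (L - ((0 : Nat) - 1 : Int) - 0) = L from by omega]
    simp [pvCombos, pvGen, foldl_pvAStep_nil_loc]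
  | cons h t =>
    simp only [pvALine, pvBLines]
    set S : Int := ((h :: t).length : Int) + min L (L - (((h :: t).length : Int) - 1) - (h :: t).sum) with hS
    by_cases h0 : 0 ≤ S
    · rw [show S = ((S.toNat : Nat) : Int) from by omega]
      simp only [Int.toNat_natCast]
      exact pvMain S.toNat (h :: t)
    · -- L - groups do not fit: both sides produce no line
      have e : S.toNat = 0 := by omega
      have e2 : (S - ((t.length : Int) + 1) + 1).toNat = 0 := by omega
      rw [e, pvGen, e2]
      simp [pvCombos]

-- ===== VERDICT (by name: the statement is the Claim_ definition above) =====
theorem calculate_domains_spec : Claim_equal_calculate_domains := by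
  intro y x _
  show _ = _
  unfold calculate_domains calculate_domains_alt
  simp [pvLine_eq]
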